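-- pv_equiv track=rewrite | github.com/HarunFeraidon/advent-of-code | day1/solution.py | get_numbers_list
-- ===== SOURCE A (Python) =====
-- def get_numbers_list(input_str: str) -> list[int]:
--     numbers = []
--     lines = input_str.splitlines()
--     for line in lines:
--         left = 0
--         right = len(line) - 1
--         current = 0
--
--         while left < len(line):
--             if line[left].isdigit():
--                 current = int(line[left])
--                 break
--             left += 1
--
--         while right >= 0:
--             if line[right].isdigit():
--                 current = current*10 + int(line[right])
--                 break
--             right -= 1
--
--         numbers.append(current)
--     return numbers
-- ===== SOURCE B (Python) =====
-- def get_numbers_list(input_str: str) -> list[int]: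
--     numbers = []
--     for line in input_str.splitlines():
--         digits = [c for c in line if c.isdigit()]
--         if not digits:
--             numbers.append(0)
--         else:
--             numbers.append(int(digits[0]) * 10 + int(digits[-1]))
--     return numbers
-- ===== Notes on version B (the rewrite author's own statement) =====
-- stated objective: idiomatic
-- what changed: Replaces A's two pointer-walk end scans per line (left while-loop for the first digit, right while-loop for the last) with a single collect-all-digits comprehension followed by first/last indexing.
import Mathlib
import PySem

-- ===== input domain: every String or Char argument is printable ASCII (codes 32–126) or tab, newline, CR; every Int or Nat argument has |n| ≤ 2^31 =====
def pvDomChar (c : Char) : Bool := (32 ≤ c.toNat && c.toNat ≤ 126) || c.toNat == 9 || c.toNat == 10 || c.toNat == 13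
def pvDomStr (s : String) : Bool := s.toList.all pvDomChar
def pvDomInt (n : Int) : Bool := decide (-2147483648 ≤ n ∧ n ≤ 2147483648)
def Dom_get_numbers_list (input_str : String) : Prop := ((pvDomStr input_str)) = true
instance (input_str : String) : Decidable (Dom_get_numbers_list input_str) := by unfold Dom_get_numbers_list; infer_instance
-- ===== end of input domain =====

-- B replaces A's two end-scans per line by one collect-all-digits pass with first/last indexing (idiomatic).

-- ===== PORT A =====
-- int(c) for a digit character c
def pvDigit (c : Char) : Int := (c.toNat : Int) - 48

-- 'while left < len(line): if line[left].isdigit(): current = int(line[left]); break; left += 1'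
-- as the obvious structural recursion over the suffix starting at left
def pvScanLeft (cs : List Char) (current : Int) : Int :=
  match cs with
  | [] => current
  | c :: rest => if PySem.Chars.isdigit c then pvDigit c else pvScanLeft rest current

-- 'while right >= 0: if line[right].isdigit(): current = current*10 + int(line[right]); break; right -= 1'
-- as the same recursion over the reversed line
def pvScanRight (cs : List Char) (current : Int) : Int :=
  match cs with
  | [] => current
  | c :: rest => if PySem.Chars.isdigit c then current * 10 + pvDigit c else pvScanRight rest current

def get_numbers_list (input_str : String) : List Int :=
  (PySem.Str.splitlines input_str).map (fun line =>
    pvScanRight line.toList.reverse (pvScanLeft line.toList 0))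

-- ===== PORT B =====
def pvLineB (cs : List Char) : Int :=
  let ds := cs.filter (fun c => PySem.Chars.isdigit c)
  match h : ds with
  | [] => 0
  | d :: rest => pvDigit d * 10 + pvDigit ((d :: rest).getLast (by simp))

def get_numbers_list_alt (input_str : String) : List Int :=
  (PySem.Str.splitlines input_str).map (fun line => pvLineB line.toList)

-- ===== PRECONDITION & SPEC =====
def Spec_get_numbers_list (input_str : String) (out : List Int) : Prop := out = get_numbers_list_alt input_str
instance (input_str : String) (out : List Int) : Decidable (Spec_get_numbers_list input_str out) := by unfold Spec_get_numbers_list; infer_instance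

-- ===== CLAIM (what is proved, stated in full; the proofs are below) =====
def Claim_equal_get_numbers_list : Prop := ∀ (input_str : String), Dom_get_numbers_list input_str → Spec_get_numbers_list input_str (get_numbers_list input_str)

-- ===== LEMMAS AND PROOFS =====

-- A's left scan returns the first digit's value (or current if none)
theorem pvScanLeft_eq (cs : List Char) (cur : Int) :
    pvScanLeft cs cur =
      match cs.filter (fun c => PySem.Chars.isdigit c) with
      | [] => cur
      | d :: _ => pvDigit d := by
  induction cs with
  | nil => simp [pvScanLeft]
  | cons c rest ih =>
    simp only [pvScanLeft, List.filter_cons]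
    by_cases h : PySem.Chars.isdigit c <;> simp [h, ih]

-- A's right scan returns cur*10 + first digit's value (or cur if none)
theorem pvScanRight_eq (cs : List Char) (cur : Int) :
    pvScanRight cs cur =
      match cs.filter (fun c => PySem.Chars.isdigit c) with
      | [] => cur
      | d :: _ => cur * 10 + pvDigit d := by
  induction cs with
  | nil => simp [pvScanRight]
  | cons c rest ih =>
    simp only [pvScanRight, List.filter_cons]
    by_cases h : PySem.Chars.isdigit c <;> simp [h, ih]

theorem pvLine_eq (cs : List Char) :
    pvScanRight cs.reverse (pvScanLeft cs 0) = pvLineB cs := by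
  rw [pvScanLeft_eq, pvScanRight_eq]
  unfold pvLineB
  rw [List.filter_reverse]
  cases h : cs.filter (fun c => PySem.Chars.isdigit c) with
  | nil => simp
  | cons d rest =>
    simp only [List.reverse_cons]
    cases hr : rest.reverse with
    | nil =>
      have : rest = [] := by simpa using congrArg List.reverse hr
      subst this; simp
    | cons e tl =>
      have hrr : (d :: rest).reverse = e :: (tl ++ [d]) := by simp [hr]
      have hl : (d :: rest).getLast (by simp) = e := by
        rw [List.getLast_eq_head_reverse]; simp [hrr]
      simp [hl]

-- ===== VERDICT (by name: the statement is the Claim_ definition above) =====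
theorem get_numbers_list_spec : Claim_equal_get_numbers_list := by
  intro s _
  unfold Spec_get_numbers_list get_numbers_list get_numbers_list_alt
  exact List.map_congr_left (fun line _ => pvLine_eq line.toList)
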